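-- pv_equiv track=rewrite | github.com/lizadaly/the-numbers-nanogenmo-2025 | compose_missing_numbers.py | find_largest_string_decomposition
-- ===== SOURCE A (Python) =====
-- def find_largest_string_decomposition(target: str, available: set[int]) -> list[int] | None:
--     """
--     Decompose target number string into available numbers by matching prefixes.
--
--     Uses greedy approach: repeatedly select the longest available number that matches
--     the current prefix. For example, "12345" with available {1,2,3,123,45} becomes [123, 45].
--     Returns list of numbers that compose the target string, or None if impossible.
--     """
--     # Convert available numbers to strings for prefix matching
--     available_strs = {str(n): n for n in available}
--
--     components = []
--     pos = 0
--
--     while pos < len(target):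
--         # Try from longest to shortest prefix; exit loop early on match
--         for end in range(len(target), pos, -1):
--             chunk = target[pos:end]
--             if chunk in available_strs:
--                 components.append(available_strs[chunk])
--                 pos = end
--                 break
--         else:
--             # Can't compose this number
--             return None
--
--     return components
-- ===== SOURCE B (Python) =====
-- def find_largest_string_decomposition(target: str, available: "set[int]") -> "list[int] | None":
--     """Greedy longest-prefix decomposition via a prefix trie over str(n)."""
--     # Build a trie: each node is a dict from char to child; the key None marks
--     # a complete number and stores its int value.
--     root = {}
--     for n in available:
--         node = root
--         for ch in str(n):
--             if ch not in node:
--                 node[ch] = {}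
--             node = node[ch]
--         node[None] = n
--
--     out = []
--     pos = 0
--     L = len(target)
--     while pos < L:
--         # Walk the trie along target[pos:], tracking the deepest complete match.
--         node = root
--         best = None  # (value, end position)
--         i = pos
--         while i < L and target[i] in node:
--             node = node[target[i]]
--             i += 1
--             if None in node:
--                 best = (node[None], i)
--         if best is None:
--             return None
--         out.append(best[0])
--         pos = best[1]
--     return out
-- ===== Notes on version B (the rewrite author's own statement) =====
-- stated objective: faster
-- what changed: B replaces A's dict of number-strings plus per-position longest-to-shortest slice-and-hash scan by a prefix trie built once from str(n); each greedy step walks the trie character by character from the current position, keeping the deepest node that completes a number.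
import Mathlib
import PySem

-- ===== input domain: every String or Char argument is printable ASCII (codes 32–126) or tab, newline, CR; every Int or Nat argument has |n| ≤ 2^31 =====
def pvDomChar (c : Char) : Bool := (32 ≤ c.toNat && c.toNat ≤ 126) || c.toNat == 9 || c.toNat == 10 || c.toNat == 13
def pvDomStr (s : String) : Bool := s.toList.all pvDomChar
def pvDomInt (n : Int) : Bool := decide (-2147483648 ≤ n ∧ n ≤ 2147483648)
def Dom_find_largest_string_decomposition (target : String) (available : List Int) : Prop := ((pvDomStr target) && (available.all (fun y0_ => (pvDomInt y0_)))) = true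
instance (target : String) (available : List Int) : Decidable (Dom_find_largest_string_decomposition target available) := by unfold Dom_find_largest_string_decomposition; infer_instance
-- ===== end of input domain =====

-- B replaces the dict of number-strings and the per-position longest-to-shortest
-- prefix scan by a prefix trie walked one character at a time (objective: alternative
-- data structure; the quadratic-per-step slice-and-hash scan becomes a single walk).

-- ===== PORT A =====

-- inner `for end in range(len(target), pos, -1)` loop with its early `break`:
-- first end (scanning downward) whose chunk is a key of the dict
def pvScanEnds (d : PySem.Dict String Int) (target : String) (pos : Int) :
    List Int → Option (Int × Int)
  | [] => none
  | e :: rest =>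
    match d.get? (PySem.Str.slice target (some pos) (some e)) with
    | some v => some (v, e)
    | none => pvScanEnds d target pos rest

theorem pvScanEnds_mem {d target pos} : ∀ {l : List Int} {v e},
    pvScanEnds d target pos l = some (v, e) → e ∈ l := by
  intro l
  induction l with
  | nil => intro v e h; simp [pvScanEnds] at h
  | cons x rest ih =>
    intro v e h
    simp only [pvScanEnds] at h
    cases hx : (d.get? (PySem.Str.slice target (some pos) (some x))) with
    | some w => rw [hx] at h; simp at h; simp [h.2]
    | none => rw [hx] at h; exact List.mem_cons_of_mem _ (ih h)

-- `while pos < len(target)` loop of A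
def pvLoopA (d : PySem.Dict String Int) (target : String) (n : Nat)
    (acc : List Int) (pos : Nat) : Option (List Int) :=
  if _h : pos < n then
    match hs : pvScanEnds d target (pos : Int) (PySem.List.pyRange (n : Int) (pos : Int) (-1)) with
    | some (v, e) => pvLoopA d target n (acc ++ [v]) e.toNat
    | none => none
  else some acc
termination_by n - pos
decreasing_by
  have he := pvScanEnds_mem hs
  rw [PySem.List.mem_pyRange_neg_one] at he
  omega

def find_largest_string_decomposition (target : String) (available : List Int) : Option (List Int) :=
  let availableStrs : PySem.Dict String Int :=
    available.foldl (fun d n => d.insert (PySem.Int.toStr n) n) PySem.Dict.empty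
  pvLoopA availableStrs target ((PySem.Str.len target).toNat) [] 0

-- ===== PORT B =====

mutual
inductive PVTrie where
  | mk : Option Int → PVKids → PVTrie
deriving Repr
inductive PVKids where
  | nil : PVKids
  | cons : Char → PVTrie → PVKids → PVKids
deriving Repr
end

def PVTrie.val : PVTrie → Option Int
  | .mk v _ => v

def PVTrie.kids : PVTrie → PVKids
  | .mk _ ks => ks

-- `node[ch]` lookup in the children dict
def pvKidsFind : PVKids → Char → Option PVTrie
  | .nil, _ => none
  | .cons c t rest, c' => if c' = c then some t else pvKidsFind rest c'

-- store/overwrite a child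
def pvKidsSet : PVKids → Char → PVTrie → PVKids
  | .nil, c, t => .cons c t .nil
  | .cons c0 t0 rest, c, t =>
    if c = c0 then .cons c0 t rest else .cons c0 t0 (pvKidsSet rest c t)

-- insert str(n) into the trie, marking the final node with n
def pvTrieInsert : PVTrie → List Char → Int → PVTrie
  | .mk _ ks, [], n => .mk (some n) ks
  | .mk v ks, c :: cs, n =>
    let child := (pvKidsFind ks c).getD (.mk none .nil)
    .mk v (pvKidsSet ks c (pvTrieInsert child cs n))

def pvTrieOf (available : List Int) : PVTrie :=
  available.foldl (fun t n => pvTrieInsert t (PySem.Int.toChars n) n) (.mk none .nil)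

-- inner `while i < L and target[i] in node` walk: deepest complete match
def pvWalk : PVTrie → List Char → Nat → Option (Int × Nat) → Option (Int × Nat)
  | _, [], _, best => best
  | t, c :: cs, i, best =>
    match pvKidsFind t.kids c with
    | none => best
    | some t' =>
      let best' := match t'.val with | some v => some (v, i + 1) | none => best
      pvWalk t' cs (i + 1) best'

theorem pvWalk_some {v k} : ∀ {cs : List Char} {t : PVTrie} {i : Nat} {best},
    pvWalk t cs i best = some (v, k) → best = some (v, k) ∨ i < k := by
  intro cs
  induction cs with
  | nil => intro t i best h; exact Or.inl h
  | cons c cs ih =>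
    intro t i best h
    simp only [pvWalk] at h
    cases hf : pvKidsFind t.kids c with
    | none => rw [hf] at h; exact Or.inl h
    | some t' =>
      rw [hf] at h
      rcases ih h with h' | h'
      · cases hv : t'.val with
        | none => rw [hv] at h'; exact Or.inl h'
        | some w => rw [hv] at h'; simp at h'; omega
      · omega

-- `while pos < L` loop of B, on the remaining suffix
def pvLoopB (root : PVTrie) (cs : List Char) (acc : List Int) : Option (List Int) :=
  if hne : cs = [] then some acc
  else
    match hw : pvWalk root cs 0 none with
    | some (v, k) => pvLoopB root (cs.drop k) (acc ++ [v])
    | none => none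
termination_by cs.length
decreasing_by
  rcases pvWalk_some hw with h | h
  · simp at h
  · have : cs.length ≠ 0 := by simpa [List.length_eq_zero_iff] using hne
    simp only [List.length_drop]; omega

def find_largest_string_decomposition_alt (target : String) (available : List Int) : Option (List Int) :=
  pvLoopB (pvTrieOf available) target.toList []

-- ===== PRECONDITION & SPEC =====
def Spec_find_largest_string_decomposition (target : String) (available : List Int) (out : Option (List Int)) : Prop := out = find_largest_string_decomposition_alt target available
instance (target : String) (available : List Int) (out : Option (List Int)) : Decidable (Spec_find_largest_string_decomposition target available out) := by unfold Spec_find_largest_string_decomposition; infer_instance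

-- ===== CLAIM (what is proved, stated in full; the proofs are below) =====
def Claim_equal_find_largest_string_decomposition : Prop := ∀ (target : String) (available : List Int), Dom_find_largest_string_decomposition target available → Spec_find_largest_string_decomposition target available (find_largest_string_decomposition target available)

-- ===== LEMMAS AND PROOFS =====

-- descend along a path
def pvTrieSub : PVTrie → List Char → Option PVTrie
  | t, [] => some t
  | t, c :: cs => (pvKidsFind t.kids c).bind (fun t' => pvTrieSub t' cs)

def pvTrieGet (t : PVTrie) (cs : List Char) : Option Int :=
  (pvTrieSub t cs).bind PVTrie.val

theorem pvKidsFind_set : ∀ (ks : PVKids) (c : Char) (t : PVTrie) (c' : Char),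
    pvKidsFind (pvKidsSet ks c t) c' = if c' = c then some t else pvKidsFind ks c'
  | .nil, c, t, c' => by
    by_cases h : c' = c <;> simp [pvKidsSet, pvKidsFind, h]
  | .cons c0 t0 rest, c, t, c' => by
    by_cases h0 : c = c0
    · subst h0
      by_cases h : c' = c <;> simp [pvKidsSet, pvKidsFind, h]
    · by_cases h : c' = c0
      · subst h
        simp [pvKidsSet, h0, pvKidsFind, Ne.symm h0]
      · simp [pvKidsSet, h0, pvKidsFind, h, pvKidsFind_set rest c t c']

theorem pvTrieGet_nilTrie (cs : List Char) : pvTrieGet (.mk none .nil) cs = none := by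
  cases cs <;> simp [pvTrieGet, pvTrieSub, PVTrie.kids, pvKidsFind, PVTrie.val]

theorem pvTrieGet_insert (cs : List Char) (n : Int) : ∀ (t : PVTrie) (cs' : List Char),
    pvTrieGet (pvTrieInsert t cs n) cs' = if cs' = cs then some n else pvTrieGet t cs' := by
  induction cs with
  | nil =>
    intro t cs'
    cases t with | mk v ks =>
    cases cs' with
    | nil => simp [pvTrieInsert, pvTrieGet, pvTrieSub, PVTrie.val]
    | cons c' rest => simp [pvTrieInsert, pvTrieGet, pvTrieSub, PVTrie.kids]
  | cons c cs ih =>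
    intro t cs'
    cases t with | mk v ks =>
    cases cs' with
    | nil =>
      simp only [pvTrieInsert, pvTrieGet, pvTrieSub, Option.bind_some, PVTrie.val,
        if_neg (List.cons_ne_nil c cs).symm]
    | cons c' rest =>
      simp only [pvTrieInsert, pvTrieGet, pvTrieSub, PVTrie.kids, pvKidsFind_set]
      by_cases hc : c' = c
      · subst hc
        have := ih ((pvKidsFind ks c').getD (.mk none .nil)) rest
        by_cases hr : rest = cs
        · subst hr
          simp only [pvTrieGet] at this ⊢
          simpa using this
        · simp only [if_neg hr] at this
          simp only [if_neg (by simp [hr] : ¬ (c' :: rest = c' :: cs))]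
          simp only [pvTrieGet] at this
          cases hf : pvKidsFind ks c' with
          | some u => rw [hf] at this; simpa [hf] using this
          | none =>
            rw [hf] at this
            simp only [Option.getD_none] at this
            have h2 := pvTrieGet_nilTrie rest
            simp only [pvTrieGet] at h2
            simp [this, h2]
      · simp [hc]


-- the dict A builds and the trie B builds define the same partial map
theorem pvMapEq_aux : ∀ (l : List Int) (d : PySem.Dict String Int) (t : PVTrie),
    (∀ s : String, d.get? s = pvTrieGet t s.toList) →
    ∀ s : String,
      (l.foldl (fun d n => d.insert (PySem.Int.toStr n) n) d).get? s
        = pvTrieGet (l.foldl (fun t n => pvTrieInsert t (PySem.Int.toChars n) n) t) s.toList := by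
  intro l
  induction l with
  | nil => intro d t H s; exact H s
  | cons n l ih =>
    intro d t H s
    simp only [List.foldl_cons]
    refine ih _ _ (fun s' => ?_) s
    rw [PySem.Dict.get?_insert, pvTrieGet_insert]
    by_cases h : s' = PySem.Int.toStr n
    · subst h
      simp [PySem.Int.toList_toStr]
    · rw [if_neg h, if_neg, H s']
      intro hh
      exact h (String.toList_inj.mp (by rw [hh, PySem.Int.toList_toStr]))

theorem pvMapEq (available : List Int) (s : String) :
    (available.foldl (fun d n => d.insert (PySem.Int.toStr n) n) PySem.Dict.empty).get? s
      = pvTrieGet (pvTrieOf available) s.toList := by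
  refine pvMapEq_aux available _ _ (fun s' => ?_) s
  rw [PySem.Dict.get?_empty, pvTrieGet_nilTrie]

-- reference: largest k ≤ m with g k = some v, as a downward scan
def pvRef (g : Nat → Option Int) : Nat → Option (Int × Nat)
  | 0 => none
  | m + 1 => match g (m + 1) with
    | some v => some (v, m + 1)
    | none => pvRef g m

-- "o is the deepest complete match among lengths 1..m"
def pvBest (g : Nat → Option Int) (o : Option (Int × Nat)) (m : Nat) : Prop :=
  (o = none ∧ ∀ k, 1 ≤ k → k ≤ m → g k = none) ∨
  (∃ v k, o = some (v, k) ∧ 1 ≤ k ∧ k ≤ m ∧ g k = some v ∧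
    ∀ k', k < k' → k' ≤ m → g k' = none)

theorem pvRef_best (g : Nat → Option Int) : ∀ m, pvBest g (pvRef g m) m := by
  intro m
  induction m with
  | zero => exact Or.inl ⟨rfl, by omega⟩
  | succ m ih =>
    simp only [pvRef]
    cases hg : g (m + 1) with
    | some v => exact Or.inr ⟨v, m + 1, rfl, by omega, by omega, hg, by omega⟩
    | none =>
      rcases ih with ⟨h1, h2⟩ | ⟨v, k, h1, h2, h3, h4, h5⟩
      · refine Or.inl ⟨h1, fun k hk1 hk2 => ?_⟩
        rcases Nat.lt_or_ge k (m + 1) with h | h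
        · exact h2 k hk1 (by omega)
        · have : k = m + 1 := by omega
          subst this; exact hg
      · refine Or.inr ⟨v, k, h1, h2, by omega, h4, fun k' hk1 hk2 => ?_⟩
        rcases Nat.lt_or_ge k' (m + 1) with h | h
        · exact h5 k' hk1 (by omega)
        · have : k' = m + 1 := by omega
          subst this; exact hg

theorem pvBest_unique {g : Nat → Option Int} {o₁ o₂ : Option (Int × Nat)} {m : Nat}
    (h1 : pvBest g o₁ m) (h2 : pvBest g o₂ m) : o₁ = o₂ := by
  rcases h1 with ⟨e1, a1⟩ | ⟨v1, k1, e1, b1, c1, d1, f1⟩ <;>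
    rcases h2 with ⟨e2, a2⟩ | ⟨v2, k2, e2, b2, c2, d2, f2⟩
  · rw [e1, e2]
  · exact absurd d2 (by rw [a1 k2 b2 c2]; simp)
  · exact absurd d1 (by rw [a2 k1 b1 c1]; simp)
  · rcases Nat.lt_trichotomy k1 k2 with h | h | h
    · exact absurd d2 (by rw [f1 k2 h c2]; simp)
    · subst h
      rw [e1, e2]
      rw [d1] at d2
      simp at d2
      rw [d2]
    · exact absurd d1 (by rw [f2 k1 h c1]; simp)

theorem pvRef_some_bounds {g : Nat → Option Int} {m k : Nat} {v : Int}
    (h : pvRef g m = some (v, k)) : 1 ≤ k ∧ k ≤ m := by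
  rcases pvRef_best g m with ⟨h1, _⟩ | ⟨v', k', h1, h2, h3, _, _⟩
  · rw [h1] at h; cases h
  · rw [h1] at h
    cases h
    exact ⟨h2, h3⟩

theorem pvTrieSub_append (xs ys : List Char) : ∀ t : PVTrie,
    pvTrieSub t (xs ++ ys) = (pvTrieSub t xs).bind (fun u => pvTrieSub u ys) := by
  induction xs with
  | nil => intro t; simp [pvTrieSub]
  | cons c xs ih =>
    intro t
    simp only [List.cons_append, pvTrieSub]
    cases pvKidsFind t.kids c with
    | none => simp
    | some t' => simp [ih t']

theorem pvWalk_best (root : PVTrie) (suff : List Char) (g : Nat → Option Int)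
    (hg : ∀ k, g k = pvTrieGet root (suff.take k)) :
    ∀ (cs : List Char) (j : Nat) (t : PVTrie) (best : Option (Int × Nat)),
      suff.drop j = cs → pvTrieSub root (suff.take j) = some t → j ≤ suff.length →
      pvBest g best j → pvBest g (pvWalk t cs j best) suff.length := by
  intro cs
  induction cs with
  | nil =>
    intro j t best hdrop _ hj hbest
    have hj' : j = suff.length := by
      have := List.drop_eq_nil_iff.mp hdrop
      omega
    subst hj'
    exact hbest
  | cons c cs ih =>
    intro j t best hdrop hsub hj hbest
    have hjlt : j < suff.length := by
      by_contra hge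
      rw [List.drop_eq_nil_of_le (by omega)] at hdrop
      cases hdrop
    have hgetc : suff[j]? = some c := by
      have := congrArg (fun l => l[0]?) hdrop
      simpa [List.getElem?_drop] using this
    have htake : suff.take (j + 1) = suff.take j ++ [c] := by
      simp [List.take_succ, hgetc]
    have hsub1 : pvTrieSub root (suff.take (j + 1))
        = (pvKidsFind t.kids c).bind (fun u => some u) := by
      rw [htake, pvTrieSub_append, hsub]
      simp [pvTrieSub]
    have hnone : ∀ k, j + 1 ≤ k → pvKidsFind t.kids c = none → g k = none := by
      intro k hk hf
      have : suff.take k = suff.take (j + 1) ++ (suff.take k).drop (j + 1) := by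
        conv_lhs => rw [← List.take_append_drop (j + 1) (suff.take k)]
        rw [List.take_take, Nat.min_eq_left (by omega)]
      rw [hg k, this, pvTrieGet, pvTrieSub_append, hsub1, hf]
      simp
    simp only [pvWalk]
    cases hf : pvKidsFind t.kids c with
    | none =>
      -- the walk stops: no prefix longer than j is in the trie
      rcases hbest with ⟨h1, h2⟩ | ⟨v, k, h1, h2, h3, h4, h5⟩
      · refine Or.inl ⟨h1, fun k hk1 hk2 => ?_⟩
        rcases Nat.lt_or_ge k (j + 1) with h | h
        · exact h2 k hk1 (by omega)
        · exact hnone k h hf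
      · refine Or.inr ⟨v, k, h1, h2, by omega, h4, fun k' hk1 hk2 => ?_⟩
        rcases Nat.lt_or_ge k' (j + 1) with h | h
        · exact h5 k' hk1 (by omega)
        · exact hnone k' h hf
    | some t' =>
      have hsub' : pvTrieSub root (suff.take (j + 1)) = some t' := by
        rw [hsub1, hf]; rfl
      have hg1 : g (j + 1) = t'.val := by
        rw [hg (j + 1), pvTrieGet, hsub']; rfl
      have hdrop' : suff.drop (j + 1) = cs := by
        have : suff.drop (j + 1) = (suff.drop j).drop 1 := by
          rw [List.drop_drop]
        rw [this, hdrop]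
        rfl
      have hbest' : pvBest g (match t'.val with
          | some v => some (v, j + 1) | none => best) (j + 1) := by
        cases hv : t'.val with
        | some v =>
          exact Or.inr ⟨v, j + 1, rfl, by omega, by omega, by rw [hg1, hv], by omega⟩
        | none =>
          rcases hbest with ⟨h1, h2⟩ | ⟨v, k, h1, h2, h3, h4, h5⟩
          · refine Or.inl ⟨h1, fun k hk1 hk2 => ?_⟩
            rcases Nat.lt_or_ge k (j + 1) with h | h
            · exact h2 k hk1 (by omega)
            · have : k = j + 1 := by omega
              subst this; rw [hg1, hv]
          · refine Or.inr ⟨v, k, h1, h2, by omega, h4, fun k' hk1 hk2 => ?_⟩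
            rcases Nat.lt_or_ge k' (j + 1) with h | h
            · exact h5 k' hk1 (by omega)
            · have : k' = j + 1 := by omega
              subst this; rw [hg1, hv]
      exact ih (j + 1) t' _ hdrop' hsub' (by omega) hbest'

theorem pvStepB (root : PVTrie) (suff : List Char)
    (g : Nat → Option Int) (hg : ∀ k, g k = pvTrieGet root (suff.take k)) :
    pvWalk root suff 0 none = pvRef g suff.length := by
  have hw := pvWalk_best root suff g hg suff 0 root none (by simp)
    (by simp [pvTrieSub]) (by omega) (Or.inl ⟨rfl, by omega⟩)
  exact pvBest_unique hw (pvRef_best g suff.length)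

theorem pvStepA (d : PySem.Dict String Int) (target : String) (pos : Nat)
    (g : Nat → Option Int)
    (hg : ∀ k, g k = d.get? (PySem.Str.slice target (some (pos : Int)) (some ((pos : Int) + (k : Int))))) :
    ∀ m : Nat,
    pvScanEnds d target (pos : Int) (PySem.List.pyRange ((pos : Int) + (m : Int)) (pos : Int) (-1))
      = (pvRef g m).map (fun p => (p.1, (pos : Int) + (p.2 : Int))) := by
  intro m
  induction m with
  | zero =>
    rw [show ((pos : Int) + ((0 : Nat) : Int)) = (pos : Int) by simp,
      PySem.List.pyRange_neg_one_eq_nil (le_refl _)]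
    rfl
  | succ m ih =>
    rw [PySem.List.pyRange_neg_one_cons (by push_cast; omega),
      show ((pos : Int) + (((m : Nat) + 1 : Nat) : Int) - 1) = (pos : Int) + ((m : Nat) : Int) by push_cast; omega]
    simp only [pvScanEnds, pvRef]
    rw [← hg (m + 1)]
    cases hgm : g (m + 1) with
    | some v =>
      simp only [Option.map_some, Option.some_inj, Prod.mk.injEq, Nat.cast_add,
        Nat.cast_one]
    | none => rw [ih]

theorem pvLoops (d : PySem.Dict String Int) (root : PVTrie) (target : String)
    (H : ∀ s : String, d.get? s = pvTrieGet root s.toList) :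
    ∀ pos acc, pvLoopA d target target.toList.length acc pos
      = pvLoopB root (target.toList.drop pos) acc := by
  suffices Hs : ∀ fuel pos acc, target.toList.length - pos ≤ fuel →
      pvLoopA d target target.toList.length acc pos
        = pvLoopB root (target.toList.drop pos) acc by
    intro pos acc
    exact Hs (target.toList.length - pos) pos acc (le_refl _)
  intro fuel
  induction fuel with
  | zero =>
    intro pos acc hle
    have hge : target.toList.length ≤ pos := by omega
    rw [pvLoopA, dif_neg (by omega), pvLoopB.eq_def,
      dif_pos (List.drop_eq_nil_of_le hge)]
  | succ fuel ih =>
    intro pos acc hle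
    by_cases hpos : pos < target.toList.length
    · set n := target.toList.length with hn
      set suff := target.toList.drop pos with hsuff
      have hsl : suff.length = n - pos := by rw [hsuff, List.length_drop]
      have hne : suff ≠ [] := by
        intro hc
        rw [hc] at hsl
        simp at hsl
        omega
      -- the common "lookup of the length-k prefix at pos" function
      set g : Nat → Option Int :=
        fun k => d.get? (PySem.Str.slice target (some (pos : Int)) (some ((pos : Int) + (k : Int)))) with hgdef
      have hg' : ∀ k, g k = pvTrieGet root (suff.take k) := by
        intro k
        rw [hgdef]
        simp only []
        rw [H]
        congr 1
        rw [PySem.Str.toList_slice, PySem.Chars.slice_eq_listSlice,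
          PySem.List.slice_natCast_add]
      have hA : pvScanEnds d target (pos : Int)
          (PySem.List.pyRange ((n : Int)) (pos : Int) (-1))
          = (pvRef g (n - pos)).map (fun p => (p.1, (pos : Int) + (p.2 : Int))) := by
        have := pvStepA d target pos g (fun k => rfl) (n - pos)
        rw [show ((pos : Int) + ((n - pos : Nat) : Int)) = (n : Int) by omega] at this
        exact this
      have hB : pvWalk root suff 0 none = pvRef g (n - pos) := by
        rw [pvStepB root suff g hg', hsl]
      rw [pvLoopA, dif_pos hpos, pvLoopB.eq_def, dif_neg hne]
      cases hr : pvRef g (n - pos) with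
      | none =>
        rw [hr] at hA hB
        simp only [Option.map_none] at hA
        split
        · rename_i v e hs
          rw [hs] at hA; cases hA
        · split
          · rename_i v k hw
            rw [hw] at hB; cases hB
          · rfl
      | some p =>
        rcases p with ⟨v, k⟩
        rw [hr] at hA hB
        simp only [Option.map_some] at hA
        have hk := pvRef_some_bounds hr
        split
        · rename_i v' e hs
          rw [hs] at hA
          simp only [Option.some_inj, Prod.mk.injEq] at hA
          obtain ⟨hv, he⟩ := hA
          split
          · rename_i v'' k'' hw
            rw [hw] at hB
            simp only [Option.some_inj, Prod.mk.injEq] at hB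
            obtain ⟨hv2, hk2⟩ := hB
            have hetonat : e.toNat = pos + k := by omega
            rw [hetonat, hv, hv2, hk2, List.drop_drop]
            exact ih (pos + k) (acc ++ [v]) (by omega)
          · rename_i hwnone
            rw [hB] at hwnone
            cases hwnone
        · rename_i hsnone
          rw [hA] at hsnone
          cases hsnone
    · rw [pvLoopA, dif_neg hpos, pvLoopB.eq_def,
        dif_pos (List.drop_eq_nil_of_le (by omega))]

-- ===== VERDICT (by name: the statement is the Claim_ definition above) =====
theorem find_largest_string_decomposition_spec : Claim_equal_find_largest_string_decomposition := by
  intro target available _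
  show _ = _
  unfold find_largest_string_decomposition find_largest_string_decomposition_alt
  have H := pvMapEq available
  rw [PySem.Str.len_eq]
  have := pvLoops _ (pvTrieOf available) target H 0 []
  simpa using this
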